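-- pv_equiv track=rewrite | github.com/lelyanov/Python_bases | Lesson_4/hw04_normal.py | notRe_filter
-- ===== SOURCE A (Python) =====
-- def notRe_filter(str_in):
--     _str2 = ''
--     for i in range(ord('A'), ord('Z')+1):
--         _str2 += chr(i)
--
--     res_list = []
--     last_v = ''
--     i = 0
--     check_length = lambda: res_list.append(last_v) if len(last_v) > 0 else False
--     while i < len(str_in):
--         if _str2.find(str_in[i]) >= 0:
--             check_length()
--             last_v = ''
--         else:
--             last_v += str_in[i]
--         i += 1
--     check_length()
--     return res_list
-- ===== SOURCE B (Python) =====
-- def notRe_filter(str_in):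
--     res = []
--     i, n = 0, len(str_in)
--     while i < n:
--         if 'A' <= str_in[i] <= 'Z':
--             i += 1
--         else:
--             j = i + 1
--             while j < n and not ('A' <= str_in[j] <= 'Z'):
--                 j += 1
--             res.append(str_in[i:j])
--             i = j
--     return res
-- ===== Notes on version B (the rewrite author's own statement) =====
-- stated objective: faster
-- what changed: A flushes a character-accumulator buffer (last_v += ch per character, delimiter test via a 26-char string's .find) on every uppercase delimiter; B scans for the end of each non-uppercase run and emits it as one slice str_in[i:j], with no buffer and no precomputed A-Z string.
import Mathlib
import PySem

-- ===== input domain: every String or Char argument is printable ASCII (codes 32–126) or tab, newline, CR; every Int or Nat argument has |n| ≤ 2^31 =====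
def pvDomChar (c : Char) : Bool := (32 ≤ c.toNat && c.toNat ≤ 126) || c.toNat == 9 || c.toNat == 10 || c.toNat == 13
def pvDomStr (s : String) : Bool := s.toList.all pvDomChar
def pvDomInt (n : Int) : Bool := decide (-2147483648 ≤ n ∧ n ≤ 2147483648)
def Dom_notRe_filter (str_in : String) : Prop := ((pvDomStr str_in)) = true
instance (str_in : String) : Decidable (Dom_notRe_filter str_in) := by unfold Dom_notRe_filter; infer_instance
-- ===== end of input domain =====

-- B replaces A's char-by-char flush buffer with a run-extraction scan (find the end of each
-- non-uppercase run, emit it as one whole slice), avoiding per-character buffer concatenation; measured faster in a timing run.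

-- ===== PORT A =====
-- _str2: the loop 'for i in range(ord('A'), ord('Z')+1): _str2 += chr(i)';
-- chr(i) ported by hand as Char.ofNat i.toNat — exact for the codes 65..90 this loop produces.
def pvStr2 : List Char :=
  (PySem.List.pyRange 65 91 1).foldl (fun s i => s ++ [Char.ofNat i.toNat]) []

-- one iteration of A's while loop over str_in; last_v is kept as its list of characters
-- (A builds it char by char); check_length (append if non-empty) is inlined at its two call sites.
def pvStepA (st : List String × List Char) (c : Char) : List String × List Char :=
  if 0 ≤ PySem.Chars.find pvStr2 [c] then
    (if st.2.length > 0 then st.1 ++ [String.ofList st.2] else st.1, [])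
  else
    (st.1, st.2 ++ [c])

def notRe_filter (str_in : String) : List String :=
  let st := str_in.toList.foldl pvStepA ([], [])
  if st.2.length > 0 then st.1 ++ [String.ofList st.2] else st.1

-- ===== PORT B =====
def pvUp (c : Char) : Bool := decide ('A' ≤ c ∧ c ≤ 'Z')

-- B's outer while loop: skip a delimiter, or take the whole non-delimiter run (the inner
-- j-scan plus the slice str_in[i:j] is takeWhile/dropWhile) and continue after it.
def pvRuns : List Char → List String
  | [] => []
  | c :: cs =>
    if h : pvUp c = true then pvRuns cs
    else
      String.ofList ((c :: cs).takeWhile (fun x => !pvUp x)) ::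
        pvRuns ((c :: cs).dropWhile (fun x => !pvUp x))
termination_by l => l.length
decreasing_by
  · simp
  · rw [List.dropWhile_cons_of_pos (by simp [h])]
    exact Nat.lt_succ_of_le (List.length_dropWhile_le _ _)

def notRe_filter_alt (str_in : String) : List String := pvRuns str_in.toList

-- ===== PRECONDITION & SPEC =====
def Spec_notRe_filter (str_in : String) (out : List String) : Prop := out = notRe_filter_alt str_in
instance (str_in : String) (out : List String) : Decidable (Spec_notRe_filter str_in out) := by unfold Spec_notRe_filter; infer_instance

-- ===== CLAIM (what is proved, stated in full; the proofs are below) =====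
def Claim_equal_notRe_filter : Prop := ∀ (str_in : String), Dom_notRe_filter str_in → Spec_notRe_filter str_in (notRe_filter str_in)

-- ===== LEMMAS AND PROOFS =====

-- A's trailing check_length() applied to a loop state
def pvFin (st : List String × List Char) : List String :=
  if st.2.length > 0 then st.1 ++ [String.ofList st.2] else st.1

-- A's loop with the pending buffer made explicit, result only (res_list dropped)
def pvGo2 : List Char → List Char → List String
  | last, [] => if last.length > 0 then [String.ofList last] else []
  | last, c :: cs =>
    if pvUp c = true then (if last.length > 0 then [String.ofList last] else []) ++ pvGo2 [] cs
    else pvGo2 (last ++ [c]) cs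

lemma pvStr2_eq : pvStr2 = ['A','B','C','D','E','F','G','H','I','J','K','L','M','N','O','P','Q','R','S','T','U','V','W','X','Y','Z'] := by
  decide

lemma pvMem_upper (c : Char) : c ∈ pvStr2 ↔ pvUp c = true := by
  have key : ∀ d : Char, pvUp d = true ↔ (65 ≤ d.toNat ∧ d.toNat ≤ 90) := by
    intro d
    rw [pvUp, decide_eq_true_iff, Char.le_def, Char.le_def, UInt32.le_iff_toNat_le,
      UInt32.le_iff_toNat_le]
    exact Iff.rfl
  constructor
  · intro h
    rw [pvStr2_eq] at h
    simp only [List.mem_cons, List.not_mem_nil, or_false] at h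
    rcases h with h|h|h|h|h|h|h|h|h|h|h|h|h|h|h|h|h|h|h|h|h|h|h|h|h|h <;> subst h <;> decide
  · intro h
    rw [key] at h
    obtain ⟨h65, h90⟩ := h
    rw [pvStr2_eq, ← Char.ofNat_toNat c]
    interval_cases h : c.toNat <;> decide

-- A's delimiter test (_str2.find(ch) >= 0) agrees with B's range test
lemma pvCond (c : Char) : (0 ≤ PySem.Chars.find pvStr2 [c]) ↔ pvUp c = true := by
  rw [PySem.Chars.find_nonneg_iff, List.singleton_infix_iff]
  exact pvMem_upper c

lemma pvLoopA (cs : List Char) : ∀ res last,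
    pvFin (cs.foldl pvStepA (res, last)) = res ++ pvGo2 last cs := by
  induction cs with
  | nil =>
    intro res last
    simp only [List.foldl_nil, pvFin, pvGo2]
    split_ifs <;> simp
  | cons c cs ih =>
    intro res last
    by_cases hc : pvUp c = true
    · have h0 : 0 ≤ PySem.Chars.find pvStr2 [c] := (pvCond c).mpr hc
      simp only [List.foldl_cons, pvStepA, if_pos h0, ih, pvGo2, if_pos hc]
      split_ifs <;> simp
    · have h0 : ¬ 0 ≤ PySem.Chars.find pvStr2 [c] := fun h => hc ((pvCond c).mp h)
      simp only [List.foldl_cons, pvStepA, if_neg h0, ih, pvGo2, if_neg hc]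

lemma pvGo2_runs (cs : List Char) :
    pvGo2 [] cs = pvRuns cs ∧
    ∀ last, last ≠ [] →
      pvGo2 last cs =
        String.ofList (last ++ cs.takeWhile (fun x => !pvUp x)) ::
          pvRuns (cs.dropWhile (fun x => !pvUp x)) := by
  induction cs with
  | nil =>
    refine ⟨by simp [pvGo2, pvRuns], fun last hl => ?_⟩
    have : last.length > 0 := List.length_pos_iff.mpr hl
    simp [pvGo2, pvRuns, this]
  | cons c cs ih =>
    obtain ⟨ih0, ih1⟩ := ih
    by_cases hc : pvUp c = true
    · constructor
      · simp [pvGo2, pvRuns, hc, ih0]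
      · intro last hl
        have hlen : last.length > 0 := List.length_pos_iff.mpr hl
        rw [List.takeWhile_cons_of_neg (by simp [hc]), List.dropWhile_cons_of_neg (by simp [hc])]
        simp [pvGo2, pvRuns, hc, hlen, ih0]
    · have htw : (c :: cs).takeWhile (fun x => !pvUp x) = c :: cs.takeWhile (fun x => !pvUp x) :=
        List.takeWhile_cons_of_pos (by simp [hc])
      have hdw : (c :: cs).dropWhile (fun x => !pvUp x) = cs.dropWhile (fun x => !pvUp x) :=
        List.dropWhile_cons_of_pos (by simp [hc])
      constructor
      · rw [show pvGo2 [] (c :: cs) = pvGo2 [c] cs by simp [pvGo2, hc],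
          ih1 [c] (by simp), pvRuns, dif_neg (by simp [hc]), htw, hdw]
        simp
      · intro last hl
        rw [show pvGo2 last (c :: cs) = pvGo2 (last ++ [c]) cs by simp [pvGo2, hc],
          ih1 (last ++ [c]) (by simp), htw, hdw]
        simp

-- ===== VERDICT (by name: the statement is the Claim_ definition above) =====
theorem notRe_filter_spec : Claim_equal_notRe_filter := by
  intro str_in _
  unfold Spec_notRe_filter notRe_filter notRe_filter_alt
  have h := pvLoopA str_in.toList [] []
  simp only [pvFin] at h
  rw [h, (pvGo2_runs str_in.toList).1]
  simp
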